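-- pv_equiv track=rewrite | github.com/Soundarya0/30-Days-of-Code | Day 29/Bitwise.py | f_m_bitwise
-- ===== SOURCE A (Python) =====
-- def f_m_bitwise(n, k):
--     m_bitwise = 0
--     for i in range(1, n + 1):
--         for j in range(1, i):
--             bitwise = i & j
--             if m_bitwise < bitwise < k:
--                 m_bitwise = bitwise
--                 if m_bitwise == k - 1:
--                     return m_bitwise
--
--
--     return m_bitwise
-- ===== SOURCE B (Python) =====
-- def f_m_bitwise(n, k):
--     if n < 2 or k < 2:
--         return 0
--     if k > n:
--         return n - 1 if n % 2 == 1 else n - 2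
--     return k - 1 if ((k - 1) | k) <= n else k - 2
-- ===== Notes on version B (the rewrite author's own statement) =====
-- stated objective: faster
-- what changed: Replaced the O(n^2) double loop over all pairs (i,j) by an O(1) closed-form case analysis: the maximum AND below k is k-1 if (k-1)|k <= n else k-2 (for 2 <= k <= n), n-1 or n-2 by parity when k > n, and 0 for degenerate inputs.
import Mathlib
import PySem

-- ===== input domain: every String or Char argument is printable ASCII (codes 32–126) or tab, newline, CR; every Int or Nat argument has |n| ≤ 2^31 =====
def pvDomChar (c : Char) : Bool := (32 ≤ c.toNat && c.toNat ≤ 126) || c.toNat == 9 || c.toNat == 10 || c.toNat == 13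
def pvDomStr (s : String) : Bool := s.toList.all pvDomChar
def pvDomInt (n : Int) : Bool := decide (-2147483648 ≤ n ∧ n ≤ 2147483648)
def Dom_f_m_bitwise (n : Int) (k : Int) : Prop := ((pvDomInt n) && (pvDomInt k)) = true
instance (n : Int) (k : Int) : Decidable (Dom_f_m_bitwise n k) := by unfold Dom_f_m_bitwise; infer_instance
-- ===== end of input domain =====

-- B replaces A's O(n^2) double loop over all pairs by an O(1) closed-form case analysis
-- (k-1 if (k-1)|k ≤ n, else k-2, with small-input and k>n cases); same return value, proved below.

-- ===== PORT A =====
-- inner loop 'for j in range(1, i)': .inr r models the early 'return m_bitwise'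
def pvInnerA (k i : Int) (m : Int) : List Int → Int ⊕ Int
  | [] => .inl m
  | j :: js =>
    let b := PySem.Int.band i j
    if m < b ∧ b < k then
      if b = k - 1 then .inr b
      else pvInnerA k i b js
    else pvInnerA k i m js

-- outer loop 'for i in range(1, n + 1)'
def pvOuterA (k : Int) (m : Int) : List Int → Int
  | [] => m
  | i :: is =>
    match pvInnerA k i m (PySem.List.pyRange 1 i 1) with
    | .inl m' => pvOuterA k m' is
    | .inr r => r

def f_m_bitwise (n : Int) (k : Int) : Int :=
  pvOuterA k 0 (PySem.List.pyRange 1 (n + 1) 1)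

-- ===== PORT B =====
def f_m_bitwise_alt (n : Int) (k : Int) : Int :=
  if n < 2 ∨ k < 2 then 0
  else if k > n then (if PySem.Int.mod n 2 = 1 then n - 1 else n - 2)
  else if PySem.Int.bor (k - 1) k ≤ n then k - 1 else k - 2

-- ===== PRECONDITION & SPEC =====
def Spec_f_m_bitwise (n : Int) (k : Int) (out : Int) : Prop := out = f_m_bitwise_alt n k
instance (n : Int) (k : Int) (out : Int) : Decidable (Spec_f_m_bitwise n k out) := by unfold Spec_f_m_bitwise; infer_instance

-- ===== CLAIM (what is proved, stated in full; the proofs are below) =====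
def Claim_equal_f_m_bitwise : Prop := ∀ (n : Int) (k : Int), Dom_f_m_bitwise n k → Spec_f_m_bitwise n k (f_m_bitwise n k)

-- ===== LEMMAS AND PROOFS =====

-- ---- Nat bit-level facts ----

theorem pvAnd_even_odd (a b : Nat) : (2 * a) &&& (2 * b + 1) = 2 * (a &&& b) := by
  apply Nat.eq_of_testBit_eq
  intro i
  cases i with
  | zero => simp [Nat.testBit_zero, Nat.mul_mod_right]
  | succ i =>
      have h1 : 2 * a / 2 = a := by omega
      have h2 : (2 * b + 1) / 2 = b := by omega
      have h3 : 2 * (a &&& b) / 2 = a &&& b := by omega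
      rw [Nat.testBit_and, Nat.testBit_succ, Nat.testBit_succ, Nat.testBit_succ,
        h1, h2, h3, Nat.testBit_and]

theorem pvAnd_odd_odd (a b : Nat) : (2 * a + 1) &&& (2 * b + 1) = 2 * (a &&& b) + 1 := by
  apply Nat.eq_of_testBit_eq
  intro i
  cases i with
  | zero => simp [Nat.testBit_zero]
  | succ i =>
      have h1 : (2 * a + 1) / 2 = a := by omega
      have h2 : (2 * b + 1) / 2 = b := by omega
      have h3 : (2 * (a &&& b) + 1) / 2 = a &&& b := by omega
      rw [Nat.testBit_and, Nat.testBit_succ, Nat.testBit_succ, Nat.testBit_succ,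
        h1, h2, h3, Nat.testBit_and]

theorem pvOr_even_odd (a b : Nat) : (2 * a) ||| (2 * b + 1) = 2 * (a ||| b) + 1 := by
  apply Nat.eq_of_testBit_eq
  intro i
  cases i with
  | zero => simp [Nat.testBit_zero, Nat.mul_mod_right]
  | succ i =>
      have h1 : 2 * a / 2 = a := by omega
      have h2 : (2 * b + 1) / 2 = b := by omega
      have h3 : (2 * (a ||| b) + 1) / 2 = a ||| b := by omega
      rw [Nat.testBit_or, Nat.testBit_succ, Nat.testBit_succ, Nat.testBit_succ,
        h1, h2, h3, Nat.testBit_or]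

theorem pvAbsorb (a b : Nat) : (a ||| b) &&& a = a := by
  apply Nat.eq_of_testBit_eq
  intro i
  rw [Nat.testBit_and, Nat.testBit_or]
  cases a.testBit i <;> simp

-- odd m : m &&& (m-1) = m-1, in the form (2a+1) &&& 2a = 2a
theorem pvAnd_odd_pred (a : Nat) : (2 * a + 1) &&& (2 * a) = 2 * a := by
  rw [Nat.and_comm, pvAnd_even_odd, Nat.and_self]

-- a strict supermask of m is at least m ||| (m+1)
theorem pvSupermask (m : Nat) : ∀ c : Nat, c &&& m = m → c ≠ m → m ||| (m + 1) ≤ c := by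
  induction m using Nat.strong_induction_on with
  | _ m ih =>
    intro c hsub hne
    rcases Nat.even_or_odd m with he | ho
    · -- m even: m ||| (m+1) = m+1 and c ≥ m+1
      obtain ⟨a, ha⟩ := he
      have h2 : m = 2 * a := by omega
      subst h2
      have hor : 2 * a ||| (2 * a + 1) = 2 * a + 1 := by
        have h := pvOr_even_odd a a
        rwa [Nat.or_self] at h
      have hle : 2 * a ≤ c := by
        calc 2 * a = c &&& 2 * a := hsub.symm
        _ ≤ c := Nat.and_le_left
      omega
    · -- m odd
      obtain ⟨a, ha⟩ := ho
      subst ha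
      rcases Nat.even_or_odd c with hce | hco
      · exfalso
        obtain ⟨d, hd⟩ := hce
        have hc2 : c = 2 * d := by omega
        rw [hc2, pvAnd_even_odd] at hsub
        omega
      · obtain ⟨d, hd⟩ := hco
        rw [hd] at hsub hne
        rw [pvAnd_odd_odd] at hsub
        have hda : d &&& a = a := by omega
        have hdne : d ≠ a := by intro h; exact hne (by omega)
        have hih : a ||| (a + 1) ≤ d := ih a (by omega) d hda hdne
        have hor : (2 * a + 1) ||| (2 * a + 1 + 1) = 2 * (a ||| (a + 1)) + 1 := by
          have h := pvOr_even_odd (a + 1) a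
          rw [Nat.or_comm (a + 1) a] at h
          rw [Nat.or_comm (2 * a + 1)]
          have h2 : 2 * a + 1 + 1 = 2 * (a + 1) := by omega
          rw [h2]
          exact h
        omega

-- ---- Int-level consequences (for 0 ≤ arguments) ----

theorem pvBandNN (i j : Int) (hi : 0 ≤ i) (hj : 0 ≤ j) :
    PySem.Int.band i j = ((i.toNat &&& j.toNat : Nat) : Int) := by
  rw [PySem.Int.band_of_nonneg hi hj]

theorem pvBand_le_right (i j : Int) (hi : 0 ≤ i) (hj : 0 ≤ j) : PySem.Int.band i j ≤ j := by
  rw [pvBandNN i j hi hj]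
  have := Nat.and_le_right (n := i.toNat) (m := j.toNat)
  omega

theorem pvBand_nonneg (i j : Int) (hi : 0 ≤ i) (hj : 0 ≤ j) : 0 ≤ PySem.Int.band i j := by
  rw [pvBandNN i j hi hj]; positivity

-- if i &&& j = v and v = j (i is a supermask of j) with j < i then i ≥ j ||| (j+1)
theorem pvSupermaskInt (i j : Int) (hj : 0 ≤ j) (hji : j < i)
    (h : PySem.Int.band i j = j) : PySem.Int.bor j (j + 1) ≤ i := by
  have hi : 0 ≤ i := by omega
  rw [pvBandNN i j hi hj] at h
  have hsub : i.toNat &&& j.toNat = j.toNat := by omega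
  have hne : i.toNat ≠ j.toNat := by omega
  have := pvSupermask j.toNat i.toNat hsub hne
  rw [PySem.Int.bor_of_nonneg hj (by omega)]
  have hj1 : (j + 1).toNat = j.toNat + 1 := by omega
  rw [hj1]
  omega

-- ---- characterisation of A's loops ----

-- soundness + monotonicity + completeness of the inner loop
theorem pvInnerA_inl (k i : Int) : ∀ (js : List Int) (m m' : Int),
    pvInnerA k i m js = .inl m' →
    (m' = m ∨ ∃ j ∈ js, m' = PySem.Int.band i j ∧ m' < k) ∧ m ≤ m' ∧
    (∀ j ∈ js, PySem.Int.band i j < k → PySem.Int.band i j ≤ m') := by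
  intro js
  induction js with
  | nil => intro m m' h; simp [pvInnerA] at h; subst h; simp
  | cons j js ihl =>
    intro m m' h
    simp only [pvInnerA] at h
    split at h
    · next hcond =>
      split at h
      · exact absurd h (by simp)
      · obtain ⟨hmem, hle, hub⟩ := ihl _ _ h
        refine ⟨?_, by omega, ?_⟩
        · rcases hmem with h1 | ⟨j', hj', h2⟩
          · exact Or.inr ⟨j, by simp, by omega⟩
          · exact Or.inr ⟨j', by simp [hj'], h2⟩
        · intro j' hj' hlt
          rcases List.mem_cons.mp hj' with h1 | h1
          · subst h1; exact le_trans (by omega) hle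
          · exact hub j' h1 hlt
    · next hcond =>
      obtain ⟨hmem, hle, hub⟩ := ihl _ _ h
      refine ⟨?_, hle, ?_⟩
      · rcases hmem with h1 | ⟨j', hj', h2⟩
        · exact Or.inl h1
        · exact Or.inr ⟨j', by simp [hj'], h2⟩
      · intro j' hj' hlt
        rcases List.mem_cons.mp hj' with h1 | h1
        · subst h1
          rcases not_and_or.mp hcond with h2 | h2
          · omega
          · exact absurd hlt h2
        · exact hub j' h1 hlt

theorem pvInnerA_inr (k i : Int) : ∀ (js : List Int) (m r : Int),
    pvInnerA k i m js = .inr r →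
    r = k - 1 ∧ (∃ j ∈ js, r = PySem.Int.band i j) ∧ m < r ∧ r < k := by
  intro js
  induction js with
  | nil => intro m r h; simp [pvInnerA] at h
  | cons j js ihl =>
    intro m r h
    simp only [pvInnerA] at h
    split at h
    · next hcond =>
      split at h
      · next hb =>
        simp only [Sum.inr.injEq] at h
        subst h
        exact ⟨hb, ⟨j, by simp, rfl⟩, by omega, by omega⟩
      · obtain ⟨h1, ⟨j', hj', h2⟩, h3, h4⟩ := ihl _ _ h
        exact ⟨h1, ⟨j', by simp [hj'], h2⟩, by omega, h4⟩
    · obtain ⟨h1, ⟨j', hj', h2⟩, h3, h4⟩ := ihl _ _ h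
      exact ⟨h1, ⟨j', by simp [hj'], h2⟩, h3, h4⟩

-- combined characterisation of the outer loop
theorem pvOuterA_char (k : Int) : ∀ (is : List Int) (m : Int),
    (0 ≤ m ∧ (m = 0 ∨ m < k)) →
    (pvOuterA k m is = m ∨ ∃ i ∈ is, ∃ j, 1 ≤ j ∧ j < i ∧
        pvOuterA k m is = PySem.Int.band i j ∧ pvOuterA k m is < k) ∧
    m ≤ pvOuterA k m is ∧
    (∀ i ∈ is, ∀ j, 1 ≤ j → j < i → PySem.Int.band i j < k →
        PySem.Int.band i j ≤ pvOuterA k m is) := by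
  intro is
  induction is with
  | nil => intro m _; simp [pvOuterA]
  | cons i is ihl =>
    intro m hm
    cases hinner : pvInnerA k i m (PySem.List.pyRange 1 i 1) with
    | inl m' =>
      simp only [pvOuterA, hinner]
      obtain ⟨imem, ile, iub⟩ := pvInnerA_inl k i _ m m' hinner
      have hm' : 0 ≤ m' ∧ (m' = 0 ∨ m' < k) := by
        rcases imem with h1 | ⟨j, hj, h2, h3⟩
        · omega
        · omega
      obtain ⟨omem, ole, oub⟩ := ihl m' hm'
      refine ⟨?_, by omega, ?_⟩
      · rcases omem with h1 | ⟨i', hi', j', hj1, hj2, hj3, hj4⟩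
        · rcases imem with h2 | ⟨j, hj, h2, h3⟩
          · exact Or.inl (by omega)
          · rw [PySem.List.mem_pyRange_one] at hj
            exact Or.inr ⟨i, by simp, j, hj.1, hj.2, by omega, by omega⟩
        · exact Or.inr ⟨i', by simp [hi'], j', hj1, hj2, hj3, hj4⟩
      · intro i' hi' j hj1 hj2 hlt
        rcases List.mem_cons.mp hi' with h1 | h1
        · subst h1
          have := iub j (PySem.List.mem_pyRange_one.mpr ⟨hj1, hj2⟩) hlt
          omega
        · exact oub i' h1 j hj1 hj2 hlt
    | inr r =>
      simp only [pvOuterA, hinner]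
      obtain ⟨h1, ⟨j, hj, h2⟩, h3, h4⟩ := pvInnerA_inr k i _ m r hinner
      rw [PySem.List.mem_pyRange_one] at hj
      refine ⟨Or.inr ⟨i, by simp, j, hj.1, hj.2, h2, h4⟩, by omega, ?_⟩
      intro i' _ j' _ _ hlt
      omega

-- ---- the closed form satisfies the same characterisation ----

theorem pvAlt_nonneg (n k : Int) : 0 ≤ f_m_bitwise_alt n k := by
  unfold f_m_bitwise_alt
  split_ifs <;> omega

-- every admissible pair value is at most B's answer
theorem pvAlt_ub (n k i j : Int) (hj : 1 ≤ j) (hji : j < i) (hin : i ≤ n)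
    (hlt : PySem.Int.band i j < k) : PySem.Int.band i j ≤ f_m_bitwise_alt n k := by
  have hbj : PySem.Int.band i j ≤ j := pvBand_le_right i j (by omega) (by omega)
  have hb0 : 0 ≤ PySem.Int.band i j := pvBand_nonneg i j (by omega) (by omega)
  unfold f_m_bitwise_alt
  split_ifs with h1 h2 h3 h3
  · omega
  · -- k > n, n odd: band ≤ j ≤ n-1
    omega
  · -- k > n, n even: band ≠ n-1
    by_cases hbn : PySem.Int.band i j = n - 1
    · exfalso
      have hjn : j = n - 1 := by omega
      have hsup : PySem.Int.bor j (j + 1) ≤ i := by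
        apply pvSupermaskInt i j (by omega) hji
        omega
      -- j = n-1 odd, j+1 = n even, so bor j (j+1) is odd and ≥ n, hence > n ≥ i
      have hjnn : 0 ≤ j := by omega
      rw [PySem.Int.bor_of_nonneg hjnn (by omega)] at hsup
      have hne : n % 2 = 0 := by
        rw [PySem.Int.mod_eq_emod_of_pos (show (0:Int) < 2 by norm_num)] at h3
        omega
      -- n even, j = n-1: j.toNat = 2a+1 for a = (n-2)/2... show bor odd
      obtain ⟨a, ha⟩ : ∃ a : Nat, j.toNat = 2 * a + 1 := by
        refine ⟨(j.toNat - 1) / 2, ?_⟩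
        omega
      have hj1 : (j + 1).toNat = 2 * (a + 1) := by omega
      have : (2 * (a + 1)) ||| (2 * a + 1) = 2 * ((a + 1) ||| a) + 1 := pvOr_even_odd (a + 1) a
      rw [ha, hj1, Nat.or_comm] at hsup
      have hle : a + 1 ≤ (a + 1) ||| a := Nat.left_le_or
      omega
    · omega
  · -- 2 ≤ k ≤ n, (k-1)|k ≤ n : answer k-1, band < k
    omega
  · -- 2 ≤ k ≤ n, (k-1)|k > n : band ≠ k-1
    by_cases hbk : PySem.Int.band i j = k - 1
    · exfalso
      -- i is a strict supermask of k-1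
      have hik : PySem.Int.band i (k - 1) = k - 1 := by
        have h5 : i ≠ k - 1 := by
          intro h; rw [h] at hji; omega
        -- (i & j) & i = i & j: from band i j = k-1 deduce band i (k-1) = k-1
        rw [pvBandNN i j (by omega) (by omega)] at hbk
        rw [pvBandNN i (k - 1) (by omega) (by omega)]
        have : i.toNat &&& j.toNat = (k - 1).toNat := by omega
        have h6 : i.toNat &&& (k - 1).toNat = (k - 1).toNat := by
          rw [← this, ← Nat.and_assoc, Nat.and_self]
        omega
      have hine : i ≠ k - 1 := by intro h; rw [h] at hji; omega
      have hsup : PySem.Int.bor (k - 1) k ≤ i := by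
        have := pvSupermaskInt i (k - 1) (by omega) (by omega) hik
        have hk1 : k - 1 + 1 = k := by omega
        rwa [hk1] at this
      omega
    · omega

-- B's answer is 0 or achieved by an admissible pair
theorem pvAlt_mem (n k : Int) :
    f_m_bitwise_alt n k = 0 ∨ ∃ i j, 1 ≤ j ∧ j < i ∧ i ≤ n ∧
      f_m_bitwise_alt n k = PySem.Int.band i j ∧ f_m_bitwise_alt n k < k := by
  unfold f_m_bitwise_alt
  split_ifs with h1 h2 h3 h3
  · exact Or.inl rfl
  · -- k > n, n odd ≥ 2 (so n ≥ 3): pair (n, n-1)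
    right
    refine ⟨n, n - 1, ?_, by omega, le_refl n, ?_, by omega⟩
    · have : n % 2 = 1 := by
        rw [PySem.Int.mod_eq_emod_of_pos (show (0:Int) < 2 by norm_num)] at h3
        exact h3
      omega
    · have hmod : n % 2 = 1 := by
        rw [PySem.Int.mod_eq_emod_of_pos (show (0:Int) < 2 by norm_num)] at h3
        exact h3
      obtain ⟨a, ha⟩ : ∃ a : Nat, n.toNat = 2 * a + 1 := ⟨(n.toNat - 1) / 2, by omega⟩
      rw [pvBandNN n (n - 1) (by omega) (by omega)]
      have h4 : (n - 1).toNat = 2 * a := by omega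
      rw [ha, h4, pvAnd_odd_pred]
      omega
  · -- k > n, n even: n = 2 gives 0; n ≥ 4: pair (n-1, n-2)
    have hmod : n % 2 = 0 := by
      rw [PySem.Int.mod_eq_emod_of_pos (show (0:Int) < 2 by norm_num)] at h3
      omega
    by_cases hn2 : n = 2
    · exact Or.inl (by omega)
    · right
      refine ⟨n - 1, n - 2, by omega, by omega, by omega, ?_, by omega⟩
      obtain ⟨a, ha⟩ : ∃ a : Nat, (n - 1).toNat = 2 * a + 1 := ⟨(n.toNat - 2) / 2, by omega⟩
      rw [pvBandNN (n - 1) (n - 2) (by omega) (by omega)]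
      have h4 : (n - 2).toNat = 2 * a := by omega
      rw [ha, h4, pvAnd_odd_pred]
      omega
  · -- (k-1)|k ≤ n: pair ((k-1)|k, k-1)
    right
    have hk0 : (0:Int) ≤ k - 1 := by omega
    have hbor := PySem.Int.bor_of_nonneg hk0 (show (0:Int) ≤ k by omega)
    refine ⟨PySem.Int.bor (k - 1) k, k - 1, ?_, ?_, h3, ?_, ?_⟩
    · omega
    · -- k ≤ (k-1)|k hence k-1 < bor
      rw [hbor]
      have hk2 : k.toNat ≤ (k - 1).toNat ||| k.toNat := Nat.right_le_or
      omega
    · rw [hbor, pvBandNN _ _ (by positivity) hk0]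
      have htn : ((((k - 1).toNat ||| k.toNat : Nat)) : Int).toNat = (k - 1).toNat ||| k.toNat := by
        simp
      rw [htn, pvAbsorb]
      omega
    · omega
  · -- (k-1)|k > n: k=2 gives 0; else k even ≥ 4: pair (k-1, k-2)
    have hkev : k % 2 = 0 := by
      by_contra hodd
      have hk1 : k % 2 = 1 := by omega
      -- k odd: (k-1)|k = k ≤ n, contradiction
      obtain ⟨a, ha⟩ : ∃ a : Nat, k.toNat = 2 * a + 1 := ⟨(k.toNat - 1) / 2, by omega⟩
      have h4 : (k - 1).toNat = 2 * a := by omega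
      have : (2 * a) ||| (2 * a + 1) = 2 * (a ||| a) + 1 := pvOr_even_odd a a
      rw [Nat.or_self] at this
      have hbor := PySem.Int.bor_of_nonneg (show (0:Int) ≤ k - 1 by omega) (show (0:Int) ≤ k by omega)
      rw [h4, ha] at hbor
      omega
    by_cases hk2 : k = 2
    · exact Or.inl (by omega)
    · right
      refine ⟨k - 1, k - 2, by omega, by omega, by omega, ?_, by omega⟩
      obtain ⟨a, ha⟩ : ∃ a : Nat, (k - 1).toNat = 2 * a + 1 := ⟨(k.toNat - 2) / 2, by omega⟩
      rw [pvBandNN (k - 1) (k - 2) (by omega) (by omega)]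
      have h4 : (k - 2).toNat = 2 * a := by omega
      rw [ha, h4, pvAnd_odd_pred]
      omega

-- ===== VERDICT (by name: the statement is the Claim_ definition above) =====
theorem f_m_bitwise_spec : Claim_equal_f_m_bitwise := by
  intro n k _
  unfold Spec_f_m_bitwise
  obtain ⟨omem, _, oub⟩ := pvOuterA_char k (PySem.List.pyRange 1 (n + 1) 1) 0 ⟨le_refl 0, Or.inl rfl⟩
  have hr : f_m_bitwise n k = pvOuterA k 0 (PySem.List.pyRange 1 (n + 1) 1) := rfl
  apply le_antisymm
  · -- A's result ≤ B's result
    rw [hr]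
    rcases omem with h1 | ⟨i, hi, j, hj1, hj2, hj3, hj4⟩
    · rw [h1]; exact pvAlt_nonneg n k
    · rw [PySem.List.mem_pyRange_one] at hi
      rw [hj3]
      exact pvAlt_ub n k i j hj1 hj2 (by omega) (by omega)
  · -- B's result ≤ A's result
    rcases pvAlt_mem n k with h1 | ⟨i, j, hj1, hj2, hin, heq, hlt⟩
    · rw [h1, hr]
      rcases omem with h2 | ⟨i, hi, j, hj1, hj2, hj3, hj4⟩
      · omega
      · rw [PySem.List.mem_pyRange_one] at hi
        rw [hj3]
        exact pvBand_nonneg i j (by omega) (by omega)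
    · rw [hr, heq]
      apply oub i (PySem.List.mem_pyRange_one.mpr ⟨by omega, by omega⟩) j hj1 hj2
      omega
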